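-- pv_equiv track=rewrite | github.com/AxelBlazerGit/CODEFORCES | under 1300/320A - Magic Numbers.py | check_pattern
-- ===== SOURCE A (Python) =====
-- def check_pattern(string):
--     length = len(string)
--     if length < 3:
--         return string == '11' or string == '14' or string== '1'
--     if string[0] == '4':
--         return False
--     for i in range(length - 2):
--         if string[i:i+3] not in ['111', '141', '114','144','411','441','414']:
--             return False
--
--     # If no invalid patterns found, return True
--     return True
-- ===== SOURCE B (Python) =====
-- def check_pattern(string):
--     # Single left-to-right pass tracking the length of the current run of '4's.
--     if not string or string[0] != '1':
--         return False
--     run = 0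
--     for ch in string:
--         if ch == '1':
--             run = 0
--         elif ch == '4':
--             run += 1
--             if run == 3:
--                 return False
--         else:
--             return False
--     return True
-- ===== Notes on version B (the rewrite author's own statement) =====
-- stated objective: simpler
-- what changed: Replaces the window-vs-table check (every 3-char substring compared to a 7-entry pattern list) by a single character scan maintaining a run-length counter of consecutive '4's.
import Mathlib
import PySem

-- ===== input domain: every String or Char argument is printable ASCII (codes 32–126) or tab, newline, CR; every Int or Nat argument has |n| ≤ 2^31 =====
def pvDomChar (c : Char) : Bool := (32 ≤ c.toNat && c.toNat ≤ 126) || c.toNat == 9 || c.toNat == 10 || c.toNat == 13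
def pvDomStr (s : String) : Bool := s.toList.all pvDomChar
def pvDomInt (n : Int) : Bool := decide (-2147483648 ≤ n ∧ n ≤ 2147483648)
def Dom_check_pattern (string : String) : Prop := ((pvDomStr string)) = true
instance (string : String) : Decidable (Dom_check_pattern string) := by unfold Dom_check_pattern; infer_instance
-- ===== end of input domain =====

-- B replaces A's window-vs-pattern-table check by a single scan with a run-length counter of consecutive '4's (simpler, same result).


-- ===== PORT A =====
-- the pattern list ['111','141','114','144','411','441','414'] as char lists
def pvTableA : List (List Char) :=
  [['1','1','1'],['1','4','1'],['1','1','4'],['1','4','4'],['4','1','1'],['4','4','1'],['4','1','4']]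

def check_pattern (string : String) : Bool :=
  let cs := string.toList
  let length : Int := cs.length
  if length < 3 then (string == "11" || string == "14" || string == "1")
  else if PySem.List.pyGet? cs 0 == some '4' then false
  else (PySem.List.pyRange 0 (length - 2) 1).all
    (fun i => decide (PySem.List.slice cs (some i) (some (i + 3)) ∈ pvTableA))

-- ===== PORT B =====
-- the for-loop of Source B: run = length of the current run of consecutive '4's
def pvRunB : List Char → Nat → Bool
  | [], _ => true
  | c :: rest, run =>
    if c = '1' then pvRunB rest 0
    else if c = '4' then
      if run + 1 == 3 then false else pvRunB rest (run + 1)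
    else false

def check_pattern_alt (string : String) : Bool :=
  match string.toList with
  | [] => false
  | c :: rest => if c ≠ '1' then false else pvRunB (c :: rest) 0

-- ===== PRECONDITION & SPEC =====
def Spec_check_pattern (string : String) (out : Bool) : Prop := out = check_pattern_alt string
instance (string : String) (out : Bool) : Decidable (Spec_check_pattern string out) := by unfold Spec_check_pattern; infer_instance

-- ===== CLAIM (what is proved, stated in full; the proofs are below) =====
def Claim_equal_check_pattern : Prop := ∀ (string : String), Dom_check_pattern string → Spec_check_pattern string (check_pattern string)

-- ===== LEMMAS AND PROOFS =====

-- A's loop over windows, restated on Nat indices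
def pvAllW (cs : List Char) : Bool :=
  (List.range (cs.length - 2)).all (fun k => decide ((cs.drop k).take 3 ∈ pvTableA))

-- A's loop as a structural recursion over overlapping windows
def pvW3 : List Char → Bool
  | a :: b :: c :: rest => decide ([a, b, c] ∈ pvTableA) && pvW3 (b :: c :: rest)
  | _ => true

-- two-char-lookahead form of pvW3
def pvGoW (a b : Char) : List Char → Bool
  | [] => true
  | c :: rest => decide ([a, b, c] ∈ pvTableA) && pvGoW b c rest

-- the run count B carries after having just read the two characters a, b
def pvR (a b : Char) : Nat := if b = '1' then 0 else if a = '1' then 1 else 2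

lemma pvAllW_cons (a b c : Char) (rest : List Char) :
    pvAllW (a :: b :: c :: rest) =
      (decide ([a, b, c] ∈ pvTableA) && pvAllW (b :: c :: rest)) := by
  simp [pvAllW, List.range_succ_eq_map, List.all_map, Function.comp_def]
  rfl

lemma pvAllW_eq_pvW3 : ∀ cs : List Char, pvAllW cs = pvW3 cs
  | [] => by simp [pvAllW, pvW3]
  | [a] => by simp [pvAllW, pvW3]
  | [a, b] => by simp [pvAllW, pvW3]
  | a :: b :: c :: rest => by
      rw [pvAllW_cons, pvAllW_eq_pvW3 (b :: c :: rest)]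
      simp [pvW3]

lemma pvW3_eq_pvGoW (rest : List Char) : ∀ (a b : Char), pvW3 (a :: b :: rest) = pvGoW a b rest := by
  induction rest with
  | nil => intro a b; simp [pvW3, pvGoW]
  | cons c r ih => intro a b; simp [pvW3, pvGoW, ih]

-- loop on A's side equals A's pyRange/slice loop
lemma loopA_eq_pvAllW (cs : List Char) :
    ((PySem.List.pyRange 0 ((cs.length : Int) - 2) 1).all
      (fun i => decide (PySem.List.slice cs (some i) (some (i + 3)) ∈ pvTableA))) = pvAllW cs := by
  by_cases h : cs.length < 2
  · rw [PySem.List.pyRange_one_eq_nil (by omega)]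
    have h0 : cs.length - 2 = 0 := by omega
    simp [pvAllW, h0]
  · have h2 : ((cs.length : Int) - 2) = ((cs.length - 2 : Nat) : Int) := by omega
    rw [h2, PySem.List.pyRange_zero_natCast]
    simp only [List.all_map, pvAllW]
    congr 1
    funext k
    show decide (PySem.List.slice cs (some (k : Int)) (some ((k : Int) + 3)) ∈ pvTableA) = _
    have h3 : ((k : Int) + 3) = ((k : Int) + ((3 : Nat) : Int)) := by norm_num
    rw [h3, PySem.List.slice_natCast_add]

-- the key invariant: the window check from lookahead (a,b) equals B's scan with run count pvR a b
lemma pvGoW_eq_pvRunB : ∀ (cs : List Char) (a b : Char),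
    (a = '1' ∨ a = '4') → (b = '1' ∨ b = '4') → pvGoW a b cs = pvRunB cs (pvR a b)
  | [], a, b, _, _ => by simp [pvGoW, pvRunB]
  | c :: rest, a, b, ha, hb => by
    by_cases hc1 : c = '1'
    · subst hc1
      rw [pvGoW, pvRunB, if_pos rfl, pvGoW_eq_pvRunB rest b '1' hb (Or.inl rfl)]
      rcases ha with rfl | rfl <;> rcases hb with rfl | rfl <;> simp [pvR, pvTableA]
    · by_cases hc4 : c = '4'
      · subst hc4
        rw [pvGoW, pvRunB, if_neg (by decide), if_pos rfl]
        rcases ha with rfl | rfl <;> rcases hb with rfl | rfl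
        · rw [pvGoW_eq_pvRunB rest '1' '4' (Or.inl rfl) (Or.inr rfl)]; simp [pvR, pvTableA]
        · rw [pvGoW_eq_pvRunB rest '4' '4' (Or.inr rfl) (Or.inr rfl)]; simp [pvR, pvTableA]
        · rw [pvGoW_eq_pvRunB rest '1' '4' (Or.inl rfl) (Or.inr rfl)]; simp [pvR, pvTableA]
        · simp [pvR, pvTableA]
      · rw [pvGoW, pvRunB, if_neg hc1, if_neg hc4]
        have : [a, b, c] ∉ pvTableA := by
          simp only [pvTableA, List.mem_cons, List.not_mem_nil, or_false]
          rintro (h | h | h | h | h | h | h) <;> (injection h with _ h; injection h with _ h; injection h with h _) <;> simp_all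
        simp [this]

lemma string_eq_iff (s t : String) : (s == t) = (s.toList == t.toList) := by
  rw [Bool.eq_iff_iff, beq_iff_eq, beq_iff_eq, ← String.toList_inj]

theorem check_pattern_spec : Claim_equal_check_pattern := by
  intro s _
  unfold Spec_check_pattern check_pattern check_pattern_alt
  have h11 : (s == "11") = (s.toList == ['1','1']) := string_eq_iff s "11"
  have h14 : (s == "14") = (s.toList == ['1','4']) := string_eq_iff s "14"
  have h1 : (s == "1") = (s.toList == ['1']) := string_eq_iff s "1"
  match hls : s.toList with
  | [] => simp_all
  | [a] =>
    rw [if_pos (by simp)]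
    rw [h11, h14, h1, hls]
    by_cases ha : a = '1'
    · subst ha; simp; decide
    · simp [ha]
  | [a, b] =>
    rw [if_pos (by simp)]
    rw [h11, h14, h1, hls]
    by_cases ha : a = '1'
    · subst ha
      by_cases hb1 : b = '1'
      · subst hb1; simp [pvRunB]
      · by_cases hb4 : b = '4' <;> simp [hb1, hb4, pvRunB]
    · simp [ha]
  | a :: b :: c :: rest =>
    rw [if_neg (by simp; omega)]
    by_cases ha1 : a = '1'
    · subst ha1
      rw [if_neg (by simp [PySem.List.pyGet?_zero_cons])]
      rw [loopA_eq_pvAllW, pvAllW_eq_pvW3, pvW3_eq_pvGoW]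
      show pvGoW '1' b (c :: rest) =
        (if ('1' : Char) ≠ '1' then false else pvRunB ('1' :: b :: c :: rest) 0)
      rw [if_neg (by simp), pvRunB, if_pos rfl, pvRunB]
      by_cases hb1 : b = '1'
      · subst hb1
        rw [if_pos rfl]
        exact pvGoW_eq_pvRunB (c :: rest) '1' '1' (Or.inl rfl) (Or.inl rfl)
      · by_cases hb4 : b = '4'
        · subst hb4
          rw [if_neg (by decide), if_pos rfl, if_neg (by decide)]
          exact pvGoW_eq_pvRunB (c :: rest) '1' '4' (Or.inl rfl) (Or.inr rfl)
        · rw [if_neg hb1, if_neg hb4]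
          simp only [pvGoW]
          have : ['1', b, c] ∉ pvTableA := by
            simp only [pvTableA, List.mem_cons, List.not_mem_nil, or_false]
            rintro (h | h | h | h | h | h | h) <;> simp_all
          simp [this]
    · by_cases ha4 : a = '4'
      · subst ha4
        rw [if_pos (by simp [PySem.List.pyGet?_zero_cons])]
        show false = (if ('4' : Char) ≠ '1' then false else pvRunB ('4' :: b :: c :: rest) 0)
        rw [if_pos (by decide)]
      · rw [if_neg (by simp [PySem.List.pyGet?_zero_cons, ha4])]
        rw [loopA_eq_pvAllW, pvAllW_eq_pvW3, pvW3_eq_pvGoW]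
        show pvGoW a b (c :: rest) =
          (if a ≠ '1' then false else pvRunB (a :: b :: c :: rest) 0)
        rw [if_pos ha1]
        simp only [pvGoW]
        have : [a, b, c] ∉ pvTableA := by
          simp only [pvTableA, List.mem_cons, List.not_mem_nil, or_false]
          rintro (h | h | h | h | h | h | h) <;> simp_all
        simp [this]
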